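-- pv_equiv track=rewrite | github.com/PdxCodeGuild/class_kiwi | Code/matthew/python/Labs/lab7_v2.py | rot_cipher_decrypt
-- ===== SOURCE A (Python) =====
-- def rot_cipher_decrypt(message:str,shift:int):
--     encrypt_dict = {
--     'a' : 1, 'b' : 2, 'c' : 3, 'd' : 4, 'e' : 5, 'f' : 6,
--     'g' : 7, 'h' : 8, 'i' : 9, 'j' : 10, 'k' : 11, 'l' : 12,
--     'm' : 13, 'n' : 14, 'o' : 15, 'p' : 16, 'q' : 17, 'r' : 18,
--     's' : 19, 't' : 20, 'u' : 21, 'v' : 22, 'w' : 23, 'x' : 24,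
--     'y' :25, 'z' : 26,
-- }
--     decrypt_dict = {
--     0 : 'z', 1 : 'a', 2 : 'b', 3 : 'c', 4 : 'd', 5 : 'e', 6 : 'f',
--     7 : 'g', 8: 'h', 9 : 'i', 10 : 'j', 11 : 'k', 12 : 'l', 13 : 'm',
--     14 : 'n', 15 : 'o', 16 : 'p', 17 : 'q', 18 : 'r', 19 : 's', 20 : 't',
--     21 : 'u', 22 : 'v', 23 : 'w', 24 : 'x', 25 : 'y',
-- }
--     decrypt_text = ''
--     for letter in message:
--         num = encrypt_dict[letter]
--         num = ((num - shift) % 26)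
--         decrypt_text += decrypt_dict[num]
--     return decrypt_text
-- ===== SOURCE B (Python) =====
-- def rot_cipher_decrypt(message: str, shift: int):
--     # Rotate the alphabet once by string slicing, then translate the whole message through it.
--     abc = 'abcdefghijklmnopqrstuvwxyz'
--     k = (-shift) % 26
--     return message.translate(str.maketrans(abc, abc[k:] + abc[:k]))
-- ===== Notes on version B (the rewrite author's own statement) =====
-- stated objective: faster
-- what changed: Instead of A's per-letter arithmetic through two hard-coded dicts, B rotates the alphabet once by string slicing (abc[k:] + abc[:k] with k = (-shift) % 26) and applies it to the whole message with the standard-library str.maketrans/str.translate, so the per-character work runs inside the C-level translate instead of Python bytecode.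
import Mathlib
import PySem

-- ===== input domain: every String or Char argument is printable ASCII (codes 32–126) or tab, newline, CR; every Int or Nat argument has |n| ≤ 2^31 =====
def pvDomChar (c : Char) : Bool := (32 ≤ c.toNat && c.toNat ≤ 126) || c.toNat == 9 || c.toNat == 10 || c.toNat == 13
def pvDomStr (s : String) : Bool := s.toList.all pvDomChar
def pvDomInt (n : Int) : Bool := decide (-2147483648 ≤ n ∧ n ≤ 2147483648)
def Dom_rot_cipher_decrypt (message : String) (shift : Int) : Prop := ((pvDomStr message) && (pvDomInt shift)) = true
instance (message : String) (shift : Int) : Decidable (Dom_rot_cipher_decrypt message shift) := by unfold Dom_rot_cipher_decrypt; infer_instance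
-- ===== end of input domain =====

-- B rotates the whole alphabet once by string slicing and translates the message through that
-- translation table (str.maketrans/translate), replacing A's per-letter dict arithmetic (objective: faster by a constant factor — a timing run measured B ≥ 1.5× faster at the largest size).

-- ===== PORT A =====
def pvEncDict : PySem.Dict Char Int := PySem.Dict.ofList
  [('a',1),('b',2),('c',3),('d',4),('e',5),('f',6),('g',7),('h',8),('i',9),('j',10),
   ('k',11),('l',12),('m',13),('n',14),('o',15),('p',16),('q',17),('r',18),('s',19),('t',20),
   ('u',21),('v',22),('w',23),('x',24),('y',25),('z',26)]
def pvDecDict : PySem.Dict Int Char := PySem.Dict.ofList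
  [(0,'z'),(1,'a'),(2,'b'),(3,'c'),(4,'d'),(5,'e'),(6,'f'),(7,'g'),(8,'h'),(9,'i'),
   (10,'j'),(11,'k'),(12,'l'),(13,'m'),(14,'n'),(15,'o'),(16,'p'),(17,'q'),(18,'r'),(19,'s'),
   (20,'t'),(21,'u'),(22,'v'),(23,'w'),(24,'x'),(25,'y')]
-- the .getD defaults stand in for KeyError; Pre_ admits exactly the inputs with no KeyError
def rot_cipher_decrypt (message : String) (shift : Int) : String :=
  String.mk (message.toList.foldl (fun acc letter =>
    let num := (pvEncDict.get? letter).getD 0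
    let num2 := (num - shift).emod 26
    acc ++ [(pvDecDict.get? num2).getD 'a']) [])

-- ===== PORT B =====
def pvAbc : List Char := "abcdefghijklmnopqrstuvwxyz".toList
-- str.maketrans = a char->char dict from the zipped strings; str.translate = map with passthrough
def rot_cipher_decrypt_alt (message : String) (shift : Int) : String :=
  let k : Int := (-shift).emod 26
  let table : PySem.Dict Char Char :=
    PySem.Dict.ofList (pvAbc.zip (PySem.List.slice pvAbc (some k) none ++ PySem.List.slice pvAbc none (some k)))
  String.mk (message.toList.map (fun c => (table.get? c).getD c))

-- ===== PRECONDITION & SPEC =====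
-- A raises KeyError on any character outside 'a'..'z'; Pre_ admits exactly the all-lowercase messages.
def Pre_rot_cipher_decrypt (message : String) (shift : Int) : Prop :=
  message.toList.all (fun c => 97 ≤ c.toNat && c.toNat ≤ 122) = true
instance (message : String) (shift : Int) : Decidable (Pre_rot_cipher_decrypt message shift) := by
  unfold Pre_rot_cipher_decrypt; infer_instance
def pvWitness_rot_cipher_decrypt : String × Int := ("hello", 3)
def Spec_rot_cipher_decrypt (message : String) (shift : Int) (out : String) : Prop := out = rot_cipher_decrypt_alt message shift
instance (message : String) (shift : Int) (out : String) : Decidable (Spec_rot_cipher_decrypt message shift out) := by unfold Spec_rot_cipher_decrypt; infer_instance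

-- ===== CLAIM (what is proved, stated in full; the proofs are below) =====
def Claim_equal_rot_cipher_decrypt : Prop := ∀ (message : String) (shift : Int), Dom_rot_cipher_decrypt message shift → Pre_rot_cipher_decrypt message shift → Spec_rot_cipher_decrypt message shift (rot_cipher_decrypt message shift)
-- ===== LEMMAS AND PROOFS =====

theorem pv_char_eq_of_toNat {c d : Char} (h : c.toNat = d.toNat) : c = d := by
  apply Char.ext
  exact UInt32.toNat_inj.mp h

theorem pv_enc_get (c : Char) (h1 : 97 ≤ c.toNat) (h2 : c.toNat ≤ 122) :
    pvEncDict.get? c = some ((c.toNat : Int) - 96) := by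
  interval_cases h : c.toNat <;>
    · have hc : c = Char.ofNat c.toNat := pv_char_eq_of_toNat (by rw [h]; decide)
      rw [hc, h]; decide

-- per-character agreement, with the shift reduced to its residue r and the letter to its index i
set_option maxRecDepth 100000 in
theorem pv_key : ∀ (r i : Fin 26),
    (pvDecDict.get? (((((i : Nat) : Int) + 1 - ((r : Nat) : Int))).emod 26)).getD 'a'
      = ((PySem.Dict.ofList (pvAbc.zip
            (PySem.List.slice pvAbc (some ((-((r : Nat) : Int)).emod 26)) none ++
             PySem.List.slice pvAbc none (some ((-((r : Nat) : Int)).emod 26))))).get?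
          (Char.ofNat (97 + (i : Nat)))).getD (Char.ofNat (97 + (i : Nat))) := by
  decide

theorem pv_step (c : Char) (shift : Int) (h1 : 97 ≤ c.toNat) (h2 : c.toNat ≤ 122) :
    (pvDecDict.get? ((((pvEncDict.get? c).getD 0) - shift).emod 26)).getD 'a'
      = ((PySem.Dict.ofList (pvAbc.zip
            (PySem.List.slice pvAbc (some ((-shift).emod 26)) none ++
             PySem.List.slice pvAbc none (some ((-shift).emod 26))))).get? c).getD c := by
  rw [pv_enc_get c h1 h2]
  simp only [Option.getD_some]
  have hr0 : (0:Int) ≤ shift.emod 26 := Int.emod_nonneg _ (by norm_num)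
  have hr1 : shift.emod 26 < 26 := Int.emod_lt_of_pos _ (by norm_num)
  have key := pv_key ⟨(shift.emod 26).toNat, by omega⟩ ⟨c.toNat - 97, by omega⟩
  have hiI : (((c.toNat - 97 : Nat)) : Int) = (c.toNat : Int) - 97 := by omega
  have hrI : (((shift.emod 26).toNat : Nat) : Int) = shift.emod 26 := by omega
  rw [hiI, hrI] at key
  have hc : Char.ofNat (97 + (c.toNat - 97)) = c := by
    have hn : 97 + (c.toNat - 97) = c.toNat := by omega
    rw [hn, Char.ofNat_toNat]
  rw [hc] at key
  have e1 : ((c.toNat : Int) - 96 - shift).emod 26 = ((c.toNat : Int) - 97 + 1 - shift.emod 26).emod 26 := by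
    show ((c.toNat : Int) - 96 - shift) % 26 = ((c.toNat : Int) - 97 + 1 - shift % 26) % 26
    conv_rhs => rw [Int.sub_emod, Int.emod_emod_of_dvd shift (dvd_refl 26), ← Int.sub_emod]
    ring_nf
  have e2 : (-shift).emod 26 = (-(shift.emod 26)).emod 26 := by
    have hx : ∀ x : Int, -x = 0 - x := fun x => by ring
    rw [hx shift, hx (shift.emod 26)]
    show ((0:Int) - shift) % 26 = ((0:Int) - shift % 26) % 26
    conv_rhs => rw [Int.sub_emod, Int.emod_emod_of_dvd shift (dvd_refl 26), ← Int.sub_emod]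
  rw [e1, e2]
  exact key

-- ===== VERDICT (by name: the statement is the Claim_ definition above) =====
theorem rot_cipher_decrypt_spec : Claim_equal_rot_cipher_decrypt := by
  intro message shift _ hpre
  unfold Spec_rot_cipher_decrypt rot_cipher_decrypt rot_cipher_decrypt_alt
  rw [PySem.List.foldl_append_singleton_eq_map]
  congr 1
  apply List.map_congr_left
  intro c hc
  have h := List.all_eq_true.mp hpre c hc
  simp only [Bool.and_eq_true, decide_eq_true_eq] at h
  exact pv_step c shift h.1 h.2
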